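-- pv_equiv track=rewrite | github.com/browndw/morph_parser | morph_parser/prep/audit_orthography.py | _segment_index_for_position
-- ===== SOURCE A (Python) =====
-- from typing import Dict, Iterable, List, Optional
--
-- def _segment_index_for_position(
--
--     boundaries: List[int],
--     position: int,
-- ) -> Optional[int]:
--     for idx, boundary in enumerate(boundaries):
--         if position < boundary:
--             return idx
--     if boundaries:
--         return len(boundaries) - 1
--     return None
-- ===== SOURCE B (Python) =====
-- def _segment_index_for_position(boundaries, position):
--     def first_hit(bs):
--         # leftmost index i of bs with position < bs[i], else None (divide and conquer)
--         if not bs: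
--             return None
--         if len(bs) == 1:
--             return 0 if position < bs[0] else None
--         mid = len(bs) // 2
--         left = first_hit(bs[:mid])
--         if left is not None:
--             return left
--         right = first_hit(bs[mid:])
--         return None if right is None else mid + right
--
--     if not boundaries:
--         return None
--     hit = first_hit(boundaries)
--     return hit if hit is not None else len(boundaries) - 1
-- ===== Notes on version B (the rewrite author's own statement) =====
-- stated objective: alternative
-- what changed: Replaces A's linear left-to-right early-return scan by a divide-and-conquer recursion: the list is split in halves, the leftmost qualifying index is searched in the left half first, then in the right half with an offset, with the last-index fallback applied once at the top.
import Mathlib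
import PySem

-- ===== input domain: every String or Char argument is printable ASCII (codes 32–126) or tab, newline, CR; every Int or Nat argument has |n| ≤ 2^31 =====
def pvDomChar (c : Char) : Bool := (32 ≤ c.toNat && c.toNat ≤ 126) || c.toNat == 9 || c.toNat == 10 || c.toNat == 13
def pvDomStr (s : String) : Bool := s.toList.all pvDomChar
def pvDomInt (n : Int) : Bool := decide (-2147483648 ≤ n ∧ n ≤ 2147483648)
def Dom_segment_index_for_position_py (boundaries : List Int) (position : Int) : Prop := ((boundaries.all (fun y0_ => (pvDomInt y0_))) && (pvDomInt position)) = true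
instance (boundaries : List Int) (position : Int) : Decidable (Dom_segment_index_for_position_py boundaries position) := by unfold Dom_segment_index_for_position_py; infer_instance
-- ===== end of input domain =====

-- B replaces A's linear early-return scan by a divide-and-conquer recursion on halves; alternative decomposition, same result.
-- ===== PORT A =====
-- the 'for idx, boundary in enumerate(boundaries): if position < boundary: return idx' loop
def pvALoop (position : Int) : List Int → Int → Option Int
  | [], _ => none
  | b :: rest, idx => if position < b then some idx else pvALoop position rest (idx + 1)

def segment_index_for_position_py (boundaries : List Int) (position : Int) : Option Int :=
  match pvALoop position boundaries 0 with
  | some i => some i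
  | none => if boundaries.isEmpty then none else some ((boundaries.length : Int) - 1)

-- ===== PORT B =====
-- Source B's first_hit; bs[:mid] / bs[mid:] ported as take/drop, exact here since 0 ≤ mid ≤ len(bs)
def pvFirstHit (position : Int) (bs : List Int) : Option Int :=
  match h : bs with
  | [] => none
  | [b] => if position < b then some 0 else none
  | b1 :: b2 :: rest =>
    let mid := (b1 :: b2 :: rest).length / 2
    match pvFirstHit position ((b1 :: b2 :: rest).take mid) with
    | some left => some left
    | none =>
      match pvFirstHit position ((b1 :: b2 :: rest).drop mid) with
      | none => none
      | some right => some ((mid : Int) + right)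
termination_by bs.length
decreasing_by
  · simp [List.length_take]; omega
  · simp [List.length_drop]; omega

def segment_index_for_position_py_alt (boundaries : List Int) (position : Int) : Option Int :=
  if boundaries.isEmpty then none
  else
    match pvFirstHit position boundaries with
    | some hit => some hit
    | none => some ((boundaries.length : Int) - 1)

-- ===== PRECONDITION & SPEC =====
def Spec_segment_index_for_position_py (boundaries : List Int) (position : Int) (out : Option Int) : Prop := out = segment_index_for_position_py_alt boundaries position
instance (boundaries : List Int) (position : Int) (out : Option Int) : Decidable (Spec_segment_index_for_position_py boundaries position out) := by unfold Spec_segment_index_for_position_py; infer_instance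

-- ===== CLAIM (what is proved, stated in full; the proofs are below) =====
def Claim_equal_segment_index_for_position_py : Prop := ∀ (boundaries : List Int) (position : Int), Dom_segment_index_for_position_py boundaries position → Spec_segment_index_for_position_py boundaries position (segment_index_for_position_py boundaries position)

-- ===== LEMMAS AND PROOFS =====
-- reference leftmost-hit function (proof helper only)
def pvFH (position : Int) : List Int → Option Int
  | [] => none
  | b :: rest => if position < b then some 0 else (pvFH position rest).map (· + 1)

theorem pvALoop_eq_fh (position : Int) (l : List Int) (idx : Int) :
    pvALoop position l idx = (pvFH position l).map (fun i => idx + i) := by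
  induction l generalizing idx with
  | nil => simp [pvALoop, pvFH]
  | cons b rest ih =>
    simp only [pvALoop, pvFH]
    by_cases h : position < b
    · simp [h]
    · simp only [if_neg h, ih, Option.map_map]
      cases pvFH position rest <;> simp [Function.comp]
      omega

theorem pvFH_append (position : Int) (xs ys : List Int) :
    pvFH position (xs ++ ys)
      = (match pvFH position xs with
         | some i => some i
         | none => (pvFH position ys).map (fun i => (xs.length : Int) + i)) := by
  induction xs with
  | nil => cases h : pvFH position ys <;> simp [pvFH, h]
  | cons b rest ih =>
    simp only [List.cons_append, pvFH]
    by_cases h : position < b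
    · simp [h]
    · simp only [if_neg h, ih]
      cases hr : pvFH position rest with
      | some i => simp [hr]
      | none =>
        cases hy : pvFH position ys <;> simp [hr, hy]
        omega

theorem pvFirstHit_eq (position : Int) (bs : List Int) :
    pvFirstHit position bs = pvFH position bs := by
  match bs with
  | [] => simp [pvFirstHit, pvFH]
  | [b] =>
    simp only [pvFirstHit, pvFH]
    by_cases h : position < b <;> simp [h]
  | b1 :: b2 :: rest =>
    rw [pvFirstHit]
    have hl := pvFirstHit_eq position ((b1 :: b2 :: rest).take ((b1 :: b2 :: rest).length / 2))
    have hr := pvFirstHit_eq position ((b1 :: b2 :: rest).drop ((b1 :: b2 :: rest).length / 2))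
    simp only [hl, hr]
    conv_rhs => rw [← List.take_append_drop ((b1 :: b2 :: rest).length / 2) (b1 :: b2 :: rest)]
    rw [pvFH_append]
    have hlen : ((b1 :: b2 :: rest).take ((b1 :: b2 :: rest).length / 2)).length
        = (b1 :: b2 :: rest).length / 2 := by
      simp [List.length_take]; omega
    cases ht : pvFH position ((b1 :: b2 :: rest).take ((b1 :: b2 :: rest).length / 2)) with
    | some i => simp [ht]
    | none =>
      cases hd : pvFH position ((b1 :: b2 :: rest).drop ((b1 :: b2 :: rest).length / 2)) with
      | none => simp [ht, hd]
      | some r =>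
        simp [ht, hd, hlen]
        push_cast
        omega
termination_by bs.length
decreasing_by
  · simp [List.length_take]; omega
  · simp [List.length_drop]; omega

-- ===== VERDICT (by name: the statement is the Claim_ definition above) =====
theorem segment_index_for_position_py_spec : Claim_equal_segment_index_for_position_py := by
  intro boundaries position _
  unfold Spec_segment_index_for_position_py segment_index_for_position_py segment_index_for_position_py_alt
  rw [pvFirstHit_eq, pvALoop_eq_fh]
  cases hb : boundaries with
  | nil => simp [pvFH]
  | cons b rest =>
    cases pvFH position (b :: rest) <;> simp
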